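-- pv_equiv track=rewrite | github.com/linhdvu14/cp-sols | sols/CodeForces/1593_d3/D1_All_are_Same.py | solve
-- ===== SOURCE A (Python) =====
-- def solve(N, nums):
-- 	def gcd(a, b):  # assume non-neg
-- 		if a<b: a,b = b,a
-- 		while b>0: a,b = b, a%b
-- 		return a
--
-- 	mn = min(nums)
-- 	nums = [num - mn for num in nums]
-- 	if all(num==0 for num in nums): return -1
-- 	g = nums[0]
-- 	for i in range(1, N):
-- 		g = gcd(g, nums[i])
-- 	return g
-- ===== SOURCE B (Python) =====
-- def solve(N, nums):
--     # gcd of the first element's offset from the minimum and the absolute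
--     # consecutive differences among the first N elements; min == max detects
--     # the all-equal case.  Pairs come from zipping the list with its tail,
--     # bounded by the index range, so there is no indexing at all.
--     def gcd(a, b):
--         return b if a == 0 else gcd(b % a, a)
--     lo, hi = min(nums), max(nums)
--     if lo == hi:
--         return -1
--     g = nums[0] - lo
--     for _, (prev, cur) in zip(range(1, N), zip(nums, nums[1:])):
--         g = gcd(abs(cur - prev), g)
--     return g
-- ===== Notes on version B (the rewrite author's own statement) =====
-- stated objective: simpler
-- what changed: Drops the difference list, the all-zero scan and all list indexing: min==max detects the all-equal case, and a recursive one-line Euclid is folded over the absolute consecutive differences obtained by zipping the list with its tail (bounded by the index range), seeded with the first element's offset from the minimum.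
import Mathlib
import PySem

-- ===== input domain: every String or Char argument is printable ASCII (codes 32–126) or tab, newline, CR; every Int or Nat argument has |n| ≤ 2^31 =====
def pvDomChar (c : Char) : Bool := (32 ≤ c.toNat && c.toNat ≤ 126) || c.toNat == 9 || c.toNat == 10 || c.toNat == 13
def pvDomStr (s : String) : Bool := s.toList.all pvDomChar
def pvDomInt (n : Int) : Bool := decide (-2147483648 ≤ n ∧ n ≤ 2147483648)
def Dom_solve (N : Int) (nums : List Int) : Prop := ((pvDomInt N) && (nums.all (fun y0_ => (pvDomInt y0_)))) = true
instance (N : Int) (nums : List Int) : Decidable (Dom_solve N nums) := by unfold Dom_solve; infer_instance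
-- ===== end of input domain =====

-- B replaces A's min/difference-list/all-zero-scan/indexed-gcd-loop pipeline by a
-- min==max all-equal test and one index-free fold of a recursive Euclid over the
-- zipped consecutive pairs of the first N elements (objective: simpler).

-- ===== PORT A =====
-- A's inner gcd: `while b>0: a,b = b, a%b` (after the swap); literal loop
def gcdLoopA (a b : Int) : Int :=
  if h : 0 < b then gcdLoopA b (PySem.Int.mod a b) else a
termination_by b.toNat
decreasing_by
  have h1 := PySem.Int.mod_nonneg a h
  have h2 := PySem.Int.mod_lt a h
  omega

-- A's gcd: `if a<b: a,b = b,a` then the while loop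
def gcdA (a b : Int) : Int := if a < b then gcdLoopA b a else gcdLoopA a b

def solve (N : Int) (nums : List Int) : Int :=
  -- min(nums): raises ValueError on []; Pre_solve excludes the empty list
  let mn := (PySem.List.min? nums (fun x => x)).getD 0
  let nums2 := nums.map (fun num => num - mn)
  if nums2.all (fun num => num == 0) then -1
  else
    -- g = nums[0]; for i in range(1, N): g = gcd(g, nums[i])
    -- nums[i] raises IndexError when N > len(nums); Pre_solve excludes that
    let g := PySem.List.pyGetD nums2 0 0
    (PySem.List.pyRange 1 N 1).foldl (fun g i => gcdA g (PySem.List.pyGetD nums2 i 0)) g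

-- ===== PORT B =====
-- B's gcd: `b if a == 0 else gcd(b % a, a)`; the guard is `¬ 0 < a` instead of
-- `a == 0` only to make the recursion total: every call site passes a ≥ 0
-- (an abs, or a Python mod by a positive divisor), where the two guards agree.
def gcdB (a b : Int) : Int :=
  if h : 0 < a then gcdB (PySem.Int.mod b a) a else b
termination_by a.toNat
decreasing_by
  have h1 := PySem.Int.mod_nonneg b h
  have h2 := PySem.Int.mod_lt b h
  omega

def solve_alt (N : Int) (nums : List Int) : Int :=
  -- lo, hi = min(nums), max(nums): both raise ValueError on []; Pre_solve excludes []
  let lo := (PySem.List.min? nums (fun y => y)).getD 0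
  let hi := (PySem.List.max? nums (fun y => y)).getD 0
  if lo == hi then -1
  else
    -- for _, (prev, cur) in zip(range(1, N), zip(nums, nums[1:])): g = gcd(abs(cur-prev), g)
    -- nums[0] raises only on the empty list, which Pre_solve excludes (headI is exact there)
    ((PySem.List.pyRange 1 N 1).zip (nums.zip nums.tail)).foldl
      (fun g p => gcdB |p.2.2 - p.2.1| g) (nums.headI - lo)

-- ===== PRECONDITION & SPEC =====
-- Pre_ excludes exactly the inputs on which A raises: the empty list (min
-- raises ValueError) and N > len(nums) with not all elements equal (nums[i]
-- raises IndexError; when all elements are equal A returns -1 before indexing).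
def Pre_solve (N : Int) (nums : List Int) : Prop :=
  nums ≠ [] ∧ (N ≤ (nums.length : Int) ∨ ∀ y ∈ nums, y = nums.headI)
instance (N : Int) (nums : List Int) : Decidable (Pre_solve N nums) := by
  unfold Pre_solve; infer_instance

def pvWitness_solve : Int × List Int := (3, [7, 1, 4])

def Spec_solve (N : Int) (nums : List Int) (out : Int) : Prop := out = solve_alt N nums
instance (N : Int) (nums : List Int) (out : Int) : Decidable (Spec_solve N nums out) := by unfold Spec_solve; infer_instance

-- ===== CLAIM (what is proved, stated in full; the proofs are below) =====
def Claim_equal_solve : Prop := ∀ (N : Int) (nums : List Int), Dom_solve N nums → Pre_solve N nums → Spec_solve N nums (solve N nums)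

-- ===== LEMMAS AND PROOFS =====

-- one Euclidean step preserves the gcd
theorem gcd_emod_step (a b : Int) : Int.gcd b (a % b) = Int.gcd a b := by
  apply Nat.dvd_antisymm
  · apply Int.dvd_gcd
    · have h1 : ((Int.gcd b (a % b) : Nat) : Int) ∣ b := Int.gcd_dvd_left b (a % b)
      have h2 : ((Int.gcd b (a % b) : Nat) : Int) ∣ a % b := Int.gcd_dvd_right b (a % b)
      have key : ((Int.gcd b (a % b) : Nat) : Int) ∣ a % b + b * (a / b) :=
        dvd_add h2 (h1.mul_right _)
      rwa [Int.emod_add_ediv a b] at key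
    · exact Int.gcd_dvd_left b (a % b)
  · apply Int.dvd_gcd (Int.gcd_dvd_right a b)
    have h1 : ((Int.gcd a b : Nat) : Int) ∣ a := Int.gcd_dvd_left a b
    have h2 : ((Int.gcd a b : Nat) : Int) ∣ b := Int.gcd_dvd_right a b
    have key : a % b = a - b * (a / b) := by
      have := Int.emod_add_ediv a b; omega
    rw [key]
    exact dvd_sub h1 (h2.mul_right _)

theorem gcdLoopA_eq (a b : Int) (ha : 0 ≤ a) (hb : 0 ≤ b) :
    gcdLoopA a b = (Int.gcd a b : Int) := by
  have H : ∀ n : Nat, ∀ b a : Int, 0 ≤ a → 0 ≤ b → b.toNat ≤ n →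
      gcdLoopA a b = (Int.gcd a b : Int) := by
    intro n
    induction n with
    | zero =>
      intro b a ha hb hle
      have hb0 : b = 0 := by omega
      subst hb0
      rw [gcdLoopA]
      simp [Int.gcd, Int.natAbs_of_nonneg ha]
    | succ n ih =>
      intro b a ha hb hle
      rw [gcdLoopA]
      split_ifs with h
      · rw [PySem.Int.mod_eq_emod_of_pos h]
        have h1 : 0 ≤ a % b := Int.emod_nonneg a (by omega)
        have h2 : a % b < b := Int.emod_lt_of_pos a h
        rw [ih (a % b) b hb h1 (by omega), gcd_emod_step]
      · have hb0 : b = 0 := by omega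
        subst hb0
        simp [Int.gcd, Int.natAbs_of_nonneg ha]
  exact H b.toNat b a ha hb le_rfl

theorem gcdA_eq (a b : Int) (ha : 0 ≤ a) (hb : 0 ≤ b) :
    gcdA a b = (Int.gcd a b : Int) := by
  unfold gcdA
  split_ifs with h
  · rw [gcdLoopA_eq b a hb ha, Int.gcd_comm]
  · exact gcdLoopA_eq a b ha hb

-- B's recursive Euclid computes the same gcd (first argument drives the recursion)
theorem gcdB_eq (a b : Int) (ha : 0 ≤ a) (hb : 0 ≤ b) :
    gcdB a b = (Int.gcd a b : Int) := by
  have H : ∀ n : Nat, ∀ a b : Int, 0 ≤ a → 0 ≤ b → a.toNat ≤ n →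
      gcdB a b = (Int.gcd a b : Int) := by
    intro n
    induction n with
    | zero =>
      intro a b ha hb hle
      have ha0 : a = 0 := by omega
      subst ha0
      rw [gcdB]
      simp [Int.gcd, Int.natAbs_of_nonneg hb]
    | succ n ih =>
      intro a b ha hb hle
      rw [gcdB]
      split_ifs with h
      · rw [PySem.Int.mod_eq_emod_of_pos h]
        have h1 : 0 ≤ b % a := Int.emod_nonneg b (by omega)
        have h2 : b % a < a := Int.emod_lt_of_pos b h
        rw [ih (b % a) a h1 ha (by omega)]
        rw [Int.gcd_comm (b % a) a, gcd_emod_step, Int.gcd_comm]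
      · have ha0 : a = 0 := by omega
        subst ha0
        simp [Int.gcd, Int.natAbs_of_nonneg hb]
  exact H a.toNat a b ha hb le_rfl

-- generic facts about folding Nat.gcd of f over a list
theorem fold_gcd_dvd_init {α : Type} (f : α → Nat) :
    ∀ (l : List α) (a : Nat), (l.foldl (fun n x => Nat.gcd n (f x)) a) ∣ a := by
  intro l
  induction l with
  | nil => intro a; exact dvd_refl a
  | cons x t ih =>
    intro a
    exact dvd_trans (ih (Nat.gcd a (f x))) (Nat.gcd_dvd_left _ _)

theorem fold_gcd_dvd_mem {α : Type} (f : α → Nat) :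
    ∀ (l : List α) (a : Nat) (x : α), x ∈ l →
      (l.foldl (fun n x => Nat.gcd n (f x)) a) ∣ f x := by
  intro l
  induction l with
  | nil => intro a x hx; cases hx
  | cons y t ih =>
    intro a x hx
    rcases List.mem_cons.mp hx with h | h
    · subst h
      exact dvd_trans (fold_gcd_dvd_init f t (Nat.gcd a (f x))) (Nat.gcd_dvd_right _ _)
    · exact ih _ x h

theorem dvd_fold_gcd {α : Type} (f : α → Nat) :
    ∀ (l : List α) (a e : Nat), e ∣ a → (∀ x ∈ l, e ∣ f x) →
      e ∣ l.foldl (fun n x => Nat.gcd n (f x)) a := by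
  intro l
  induction l with
  | nil => intro a e ha _; exact ha
  | cons x t ih =>
    intro a e ha hl
    exact ih _ e (Nat.dvd_gcd ha (hl x (List.mem_cons_self))) (fun y hy => hl y (List.mem_cons_of_mem _ hy))

theorem fold_gcd_init {α : Type} (f : α → Nat) :
    ∀ (l : List α) (a : Nat),
      l.foldl (fun n x => Nat.gcd n (f x)) a = Nat.gcd a (l.foldl (fun n x => Nat.gcd n (f x)) 0) := by
  intro l
  induction l with
  | nil => intro a; simp [List.foldl]
  | cons x t ih =>
    intro a
    simp only [List.foldl]
    rw [ih (Nat.gcd a (f x)), ih (Nat.gcd 0 (f x))]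
    simp [Nat.gcd_assoc]

-- gcd of consecutive differences, as a Nat-level fold
def FD (xs : List Int) : Nat :=
  (xs.zip xs.tail).foldl (fun n p => Nat.gcd n (p.2 - p.1).natAbs) 0

theorem nat_dvd_sub_natAbs {d : Nat} {a b c : Int}
    (h1 : d ∣ (a - c).natAbs) (h2 : d ∣ (b - c).natAbs) : d ∣ (a - b).natAbs := by
  rw [← Int.natCast_dvd_natCast, Int.dvd_natAbs] at h1 h2 ⊢
  have key : a - b = (a - c) - (b - c) := by ring
  rw [key]
  exact dvd_sub h1 h2

theorem FD_head_dvd : ∀ (xs : List Int) (x y : Int), y ∈ x :: xs →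
    FD (x :: xs) ∣ (y - x).natAbs := by
  intro xs
  induction xs with
  | nil =>
    intro x y hy
    rcases List.mem_cons.mp hy with h | h
    · subst h; simp
    · cases h
  | cons z t ih =>
    intro x y hy
    have hfd : FD (x :: z :: t) = Nat.gcd (z - x).natAbs (FD (z :: t)) := by
      simp only [FD, List.tail_cons, List.zip_cons_cons, List.foldl_cons]
      rw [fold_gcd_init (fun p : Int × Int => (p.2 - p.1).natAbs)]
      simp
    rcases List.mem_cons.mp hy with h | h
    · subst h; simp
    · rw [hfd]
      have h2 : Nat.gcd (z - x).natAbs (FD (z :: t)) ∣ (y - z).natAbs :=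
        dvd_trans (Nat.gcd_dvd_right _ _) (ih z y h)
      have h1 : Nat.gcd (z - x).natAbs (FD (z :: t)) ∣ (x - z).natAbs := by
        have := Nat.gcd_dvd_left (z - x).natAbs (FD (z :: t))
        rwa [show x - z = -(z - x) by ring, Int.natAbs_neg]
      exact nat_dvd_sub_natAbs h2 h1

-- A's Int-level fold reduces to the Nat-level one
theorem foldl_gcdA (l : List Int) :
    ∀ (g : Int), 0 ≤ g → (∀ x ∈ l, 0 ≤ x) →
      l.foldl gcdA g = ((l.foldl (fun n x => Nat.gcd n x.natAbs) g.natAbs : Nat) : Int) := by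
  induction l with
  | nil => intro g hg _; simp [Int.natAbs_of_nonneg hg]
  | cons x t ih =>
    intro g hg hl
    simp only [List.foldl_cons]
    rw [gcdA_eq g x hg (hl x List.mem_cons_self),
      ih _ (Int.natCast_nonneg _) (fun y hy => hl y (List.mem_cons_of_mem _ hy))]
    simp [Int.gcd]

-- B's Int-level fold (gcd of the |difference| and the accumulator) reduces likewise
theorem foldl_gcdB (l : List (Int × Int)) :
    ∀ (g : Int), 0 ≤ g →
      l.foldl (fun g p => gcdB |p.2 - p.1| g) g =
        ((l.foldl (fun k p => Nat.gcd k (p.2 - p.1).natAbs) g.natAbs : Nat) : Int) := by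
  induction l with
  | nil => intro g hg; simp [Int.natAbs_of_nonneg hg]
  | cons p t ih =>
    intro g hg
    simp only [List.foldl_cons]
    rw [gcdB_eq _ _ (abs_nonneg _) hg, ih _ (Int.natCast_nonneg _)]
    simp [Int.gcd, Int.natAbs_abs, Nat.gcd_comm]

-- prefix gcd: folding over consecutive differences of x::t equals folding over
-- the elements' differences from any m, given the common seed |x - m|
theorem key_gcd (m x : Int) (t : List Int) :
    ((x :: t).zip t).foldl (fun n p => Nat.gcd n (p.2 - p.1).natAbs) (x - m).natAbs
      = t.foldl (fun n y => Nat.gcd n (y - m).natAbs) (x - m).natAbs := by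
  rw [fold_gcd_init (fun p : Int × Int => (p.2 - p.1).natAbs),
      fold_gcd_init (fun y : Int => (y - m).natAbs)]
  have hFD : ((x :: t).zip t).foldl (fun n p => Nat.gcd n (p.2 - p.1).natAbs) 0 = FD (x :: t) := rfl
  rw [hFD]
  apply Nat.dvd_antisymm
  · apply Nat.dvd_gcd (Nat.gcd_dvd_left _ _)
    apply dvd_fold_gcd
    · exact dvd_zero _
    · intro y hy
      have h1 : Nat.gcd (x - m).natAbs (FD (x :: t)) ∣ (y - x).natAbs :=
        dvd_trans (Nat.gcd_dvd_right _ _) (FD_head_dvd t x y (List.mem_cons_of_mem _ hy))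
      have h2 : Nat.gcd (x - m).natAbs (FD (x :: t)) ∣ (m - x).natAbs := by
        have := Nat.gcd_dvd_left (x - m).natAbs (FD (x :: t))
        rwa [show m - x = -(x - m) by ring, Int.natAbs_neg]
      exact nat_dvd_sub_natAbs h1 h2
  · apply Nat.dvd_gcd (Nat.gcd_dvd_left _ _)
    apply dvd_fold_gcd
    · exact dvd_zero _
    · intro p hp
      have hz : ∀ z ∈ x :: t,
          Nat.gcd (x - m).natAbs (t.foldl (fun n y => Nat.gcd n (y - m).natAbs) 0) ∣ (z - m).natAbs := by
        intro z hzm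
        rcases List.mem_cons.mp hzm with h | h
        · subst h; exact Nat.gcd_dvd_left _ _
        · exact dvd_trans (Nat.gcd_dvd_right _ _) (fold_gcd_dvd_mem _ _ _ _ h)
      exact nat_dvd_sub_natAbs
        (hz p.2 (List.mem_cons_of_mem _ (List.of_mem_zip hp).2))
        (hz p.1 (List.of_mem_zip hp).1)

theorem natkey (m x : Int) (rest : List Int) (k : Nat) :
    (((x :: rest).take k).zip ((x :: rest).take k).tail).foldl
        (fun n p => Nat.gcd n (p.2 - p.1).natAbs) (x - m).natAbs
      = (((x :: rest).take k).drop 1).foldl (fun n y => Nat.gcd n (y - m).natAbs) (x - m).natAbs := by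
  cases k with
  | zero => rfl
  | succ j =>
    rw [List.take_succ_cons]
    simp only [List.tail_cons, List.drop_succ_cons, List.drop_zero]
    exact key_gcd m x (rest.take j)

-- A's indexed loop over range(1, k) reads exactly the (drop 1 of the) take-k prefix
theorem Aside (k : Nat) (xs : List Int) (g0 d : Int) (f : Int → Int → Int)
    (hk : k ≤ xs.length) :
    (PySem.List.pyRange 1 (k : Int) 1).foldl (fun g i => f g (PySem.List.pyGetD xs i d)) g0
      = ((xs.take k).drop 1).foldl f g0 := by
  have h1 : ∀ (g : Int) (i : Int), i ∈ PySem.List.pyRange 1 (k : Int) 1 →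
      f g (PySem.List.pyGetD xs i d) = f g (PySem.List.pyGetD (xs.take k) i d) := by
    intro g i hi
    have hb := PySem.List.mem_pyRange_one.mp hi
    have hxl : (k : Int) ≤ (xs.length : Int) := by exact_mod_cast hk
    have htl : ((xs.take k).length : Int) = min (k : Int) (xs.length : Int) := by
      rw [List.length_take]; push_cast; rfl
    rw [PySem.List.pyGetD_eq_getElem xs d (by omega) (by omega),
        PySem.List.pyGetD_eq_getElem (xs.take k) d (by omega) (by omega)]
    rw [List.getElem_take]
  rw [List.foldl_ext (fun g i => f g (PySem.List.pyGetD xs i d))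
    (fun g i => f g (PySem.List.pyGetD (xs.take k) i d)) g0 h1]
  have h2 : ((k : Int)) = PySem.List.len (xs.take k) := by
    rw [PySem.List.len_eq, List.length_take]; omega
  rw [h2, PySem.List.foldl_pyRange_pyGetD (xs.take k) d f g0 (by omega : (0:Int) ≤ 1)]
  norm_num

-- B's zip with the index range keeps the first (range-length) pairs
theorem map_snd_zip_take {α β : Type} :
    ∀ (L : List α) (P : List β), (L.zip P).map Prod.snd = P.take L.length := by
  intro L
  induction L with
  | nil => intro P; simp
  | cons x t ih =>
    intro P
    cases P with
    | nil => simp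
    | cons y q => simp [ih]

theorem foldl_zip_snd {α β γ : Type} (L : List α) (P : List β) (f : γ → β → γ) (g : γ) :
    (L.zip P).foldl (fun g q => f g q.2) g = (P.take L.length).foldl f g := by
  rw [← map_snd_zip_take L P, List.foldl_map]

-- a prefix of the consecutive-pairs list is the consecutive-pairs list of a prefix
theorem zip_tail_take {α : Type} :
    ∀ (xs : List α) (j : Nat),
      (xs.zip xs.tail).take j = (xs.take (j+1)).zip ((xs.take (j+1)).tail) := by
  intro xs
  induction xs with
  | nil => intro j; simp
  | cons x t ih =>
    intro j
    cases t with
    | nil => simp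
    | cons y t2 =>
      cases j with
      | zero => simp
      | succ j' =>
        simp only [List.tail_cons, List.zip_cons_cons, List.take_succ_cons]
        have ih' := ih j'
        simp only [List.tail_cons] at ih'
        rw [ih']
        simp [List.take_succ_cons]

-- ===== VERDICT (by name: the statement is the Claim_ definition above) =====
theorem solve_spec : Claim_equal_solve := by
  intro N nums _ hpre
  obtain ⟨hne, hcase⟩ := hpre
  unfold Spec_solve solve solve_alt
  cases nums with
  | nil => exact absurd rfl hne
  | cons x rest =>
    obtain ⟨m, hm⟩ : ∃ m, PySem.List.min? (x :: rest) (fun y => y) = some m :=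
      ⟨_, PySem.List.min?_id_cons x rest⟩
    obtain ⟨hi, hM⟩ : ∃ hi, PySem.List.max? (x :: rest) (fun y => y) = some hi :=
      ⟨_, PySem.List.max?_id_cons x rest⟩
    have hmemm : m ∈ x :: rest := PySem.List.min?_mem hm
    have hmemM : hi ∈ x :: rest := PySem.List.max?_mem hM
    have hmin : ∀ y ∈ x :: rest, m ≤ y := PySem.List.min?_isMin hm
    have hmax : ∀ y ∈ x :: rest, y ≤ hi := PySem.List.max?_isMax hM
    rw [hm, hM]
    simp only [Option.getD_some]
    by_cases hEq : m = hi
    · -- all elements equal: both return -1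
      have hall : ((x :: rest).map (fun num => num - m)).all (fun num => num == 0) = true := by
        rw [List.all_eq_true]
        intro y hy
        obtain ⟨z, hz, rfl⟩ := List.mem_map.mp hy
        have h1 := hmin z hz
        have h2 := hmax z hz
        simp only [beq_iff_eq]
        omega
      rw [if_pos hall, if_pos (by simp [hEq])]
    · -- not all equal: both run their gcd folds
      have hall : ¬(((x :: rest).map (fun num => num - m)).all (fun num => num == 0) = true) := by
        intro h
        apply hEq
        have := (List.all_eq_true.mp h) (hi - m) (List.mem_map.mpr ⟨hi, hmemM, rfl⟩)
        simp only [beq_iff_eq] at this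
        omega
      have hNle : N ≤ ((x :: rest).length : Int) := by
        rcases hcase with h | h
        · exact h
        · exfalso
          apply hEq
          have hx : m = x := by
            have h1 := h m hmemm
            simp only [List.headI] at h1
            exact h1
          have hy : hi = x := by
            have h1 := h hi hmemM
            simp only [List.headI] at h1
            exact h1
          rw [hx, hy]
      rw [if_neg hall, if_neg (by simp [hEq])]
      have hxm : 0 ≤ x - m := by have := hmin x List.mem_cons_self; omega
      simp only [List.map_cons, PySem.List.pyGetD_zero_cons, List.headI, List.tail_cons]
      have hmap : (x - m) :: (rest.map (fun num => num - m)) =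
          ((x :: rest).map (fun num => num - m)) := rfl
      rw [hmap]
      by_cases hN1 : N ≤ 1
      · -- the loops are empty: both sides are nums[0] - min
        rw [PySem.List.pyRange_one_eq_nil hN1]
        rfl
      · -- N ≥ 2: both loops walk the take-N prefix
        replace hN1 : 1 < N := by omega
        obtain ⟨k, rfl⟩ : ∃ k : Nat, N = (k : Int) :=
          ⟨N.toNat, (Int.toNat_of_nonneg (by omega)).symm⟩
        have hkl : k ≤ (x :: rest).length := by
          have : ((x :: rest).length : Int) = (x :: rest).length := rfl
          omega
        rw [Aside k _ _ 0 gcdA (by rw [List.length_map]; exact hkl)]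
        -- B side: drop the range indices, keep the first k-1 consecutive pairs
        rw [foldl_zip_snd (PySem.List.pyRange 1 (k : Int) 1) ((x :: rest).zip rest)
          (fun g p => gcdB |p.2 - p.1| g) (x - m)]
        rw [PySem.List.length_pyRange_one]
        have hzt : ((x :: rest).zip ((x :: rest).tail)).take (((k : Int) - 1).toNat)
            = ((x :: rest).take ((((k : Int) - 1).toNat) + 1)).zip
                (((x :: rest).take ((((k : Int) - 1).toNat) + 1)).tail) :=
          zip_tail_take (x :: rest) _
        simp only [List.tail_cons] at hzt
        rw [hzt]
        have hk1 : (((k : Int) - 1).toNat) + 1 = k := by omega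
        rw [hk1]
        rw [← List.map_take, ← List.map_drop]
        have hnn : ∀ y ∈ (((x :: rest).take k).drop 1).map (fun num => num - m), 0 ≤ y := by
          intro y hy
          obtain ⟨z, hz, rfl⟩ := List.mem_map.mp hy
          have hz2 : z ∈ x :: rest := List.take_subset _ _ (List.drop_subset _ _ hz)
          have := hmin z hz2
          omega
        rw [foldl_gcdA _ _ hxm hnn, foldl_gcdB _ _ hxm]
        rw [List.foldl_map]
        congr 1
        exact (natkey m x rest k).symm
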